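-- pv_equiv track=rewrite | github.com/thierrygomes/Trabalho-Pratico-Grafos | Trabalho pratico/teste_uso.py | contar_arestas
-- ===== SOURCE A (Python) =====
-- def contar_arestas(required_edges, non_required_edges):
--     arestas = set()
--
--     for item in required_edges:
--         u, v = sorted((item['from'], item['to']))
--         arestas.add((u, v))
--
--     for item in non_required_edges:
--         u, v = sorted((item['from'], item['to']))
--         arestas.add((u, v))
--
--     return len(arestas)
-- ===== SOURCE B (Python) =====
-- def contar_arestas(required_edges, non_required_edges):
--     edges = []
--     for item in required_edges:
--         f, t = item['from'], item['to']
--         edges.append((f, t) if f <= t else (t, f))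
--     for item in non_required_edges:
--         f, t = item['from'], item['to']
--         edges.append((f, t) if f <= t else (t, f))
--     edges.sort()
--     count = 0
--     prev = None
--     for e in edges:
--         if e != prev:
--             count += 1
--             prev = e
--     return count
-- ===== Notes on version B (the rewrite author's own statement) =====
-- stated objective: alternative
-- what changed: Replaces hash-set deduplication with collect-all-normalized-edges, sort, then a single adjacent-compare pass that counts distinct tuples.
import Mathlib
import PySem

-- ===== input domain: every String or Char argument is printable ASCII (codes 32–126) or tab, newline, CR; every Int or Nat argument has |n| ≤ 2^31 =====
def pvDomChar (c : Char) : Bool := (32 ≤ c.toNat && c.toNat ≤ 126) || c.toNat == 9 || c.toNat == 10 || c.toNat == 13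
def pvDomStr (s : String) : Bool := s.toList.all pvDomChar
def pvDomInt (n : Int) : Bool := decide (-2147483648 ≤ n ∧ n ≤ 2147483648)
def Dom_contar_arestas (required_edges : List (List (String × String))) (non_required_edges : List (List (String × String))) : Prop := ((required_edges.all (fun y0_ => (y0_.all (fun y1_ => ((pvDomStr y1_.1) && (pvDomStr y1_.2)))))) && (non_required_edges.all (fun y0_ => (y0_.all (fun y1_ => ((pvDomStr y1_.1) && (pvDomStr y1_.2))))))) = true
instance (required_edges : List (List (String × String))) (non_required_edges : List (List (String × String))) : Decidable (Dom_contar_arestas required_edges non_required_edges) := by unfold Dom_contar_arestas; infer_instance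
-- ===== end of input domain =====

-- B replaces A's hash-set deduplication by collect-normalize / sort / count adjacent-distinct: an alternative algorithm of similar cost.


-- ===== PORT A =====
-- `u, v = sorted((item['from'], item['to']))`: Python's sorted of the 2-tuple; the `_ => (a, b)` arm is unreachable (sorted keeps length 2).
def pvSortedPairA (a b : String) : String × String :=
  match PySem.List.sorted [a, b] (fun x => x) false with
  | [u, v] => (u, v)
  | _ => (a, b)

def contar_arestas (required_edges : List (List (String × String))) (non_required_edges : List (List (String × String))) : Int :=
  let arestas : PySem.Set (String × String) := PySem.Set.empty
  let arestas := required_edges.foldl (fun s item =>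
    PySem.Set.add s (pvSortedPairA ((PySem.Dict.mk item).getD "from" "") ((PySem.Dict.mk item).getD "to" ""))) arestas
  let arestas := non_required_edges.foldl (fun s item =>
    PySem.Set.add s (pvSortedPairA ((PySem.Dict.mk item).getD "from" "") ((PySem.Dict.mk item).getD "to" ""))) arestas
  PySem.Set.len arestas

-- ===== PORT B =====
def pvNormB (item : List (String × String)) : String × String :=
  let f := (PySem.Dict.mk item).getD "from" ""
  let t := (PySem.Dict.mk item).getD "to" ""
  if f ≤ t then (f, t) else (t, f)

-- the body of B's final loop: `if e != prev: count += 1; prev = e`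
def pvCountStep (st : Int × Option (String × String)) (e : String × String) : Int × Option (String × String) :=
  if some e ≠ st.2 then (st.1 + 1, some e) else st

def contar_arestas_alt (required_edges : List (List (String × String))) (non_required_edges : List (List (String × String))) : Int :=
  let edges : List (String × String) := []
  let edges := required_edges.foldl (fun acc item => acc ++ [pvNormB item]) edges
  let edges := non_required_edges.foldl (fun acc item => acc ++ [pvNormB item]) edges
  let edges := PySem.List.sorted2 edges (fun e => e.1) (fun e => e.2) false
  (edges.foldl pvCountStep (0, none)).1

-- ===== PRECONDITION & SPEC =====
-- Pre_ excludes exactly the items lacking a 'from' or 'to' key, on which Python A raises KeyError.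
def Pre_contar_arestas (required_edges : List (List (String × String))) (non_required_edges : List (List (String × String))) : Prop :=
  (∀ item ∈ required_edges, (item.any (fun p => p.1 == "from") ∧ item.any (fun p => p.1 == "to"))) ∧
  (∀ item ∈ non_required_edges, (item.any (fun p => p.1 == "from") ∧ item.any (fun p => p.1 == "to")))
instance (required_edges : List (List (String × String))) (non_required_edges : List (List (String × String))) : Decidable (Pre_contar_arestas required_edges non_required_edges) := by unfold Pre_contar_arestas; infer_instance
def pvWitness_contar_arestas : (List (List (String × String))) × (List (List (String × String))) :=
  ([[("from", "a"), ("to", "b")], [("from", "b"), ("to", "a")]], [[("from", "a"), ("to", "c")]])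

def Spec_contar_arestas (required_edges : List (List (String × String))) (non_required_edges : List (List (String × String))) (out : Int) : Prop := out = contar_arestas_alt required_edges non_required_edges
instance (required_edges : List (List (String × String))) (non_required_edges : List (List (String × String))) (out : Int) : Decidable (Spec_contar_arestas required_edges non_required_edges out) := by unfold Spec_contar_arestas; infer_instance

-- ===== CLAIM (what is proved, stated in full; the proofs are below) =====
def Claim_equal_contar_arestas : Prop := ∀ (required_edges : List (List (String × String))) (non_required_edges : List (List (String × String))), Dom_contar_arestas required_edges non_required_edges → Pre_contar_arestas required_edges non_required_edges → Spec_contar_arestas required_edges non_required_edges (contar_arestas required_edges non_required_edges)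

-- ===== LEMMAS AND PROOFS =====

-- the two normalizations agree
theorem pvSortedPairA_eq_if (a b : String) :
    pvSortedPairA a b = if a ≤ b then (a, b) else (b, a) := by
  unfold pvSortedPairA
  simp only [PySem.List.sorted, List.foldl, PySem.List.insertBy]
  by_cases h : b < a
  · simp [h, not_le.mpr h]
  · simp [h, not_lt.mp h]

theorem pvNormB_eq (item : List (String × String)) :
    pvNormB item = pvSortedPairA ((PySem.Dict.mk item).getD "from" "") ((PySem.Dict.mk item).getD "to" "") := by
  rw [pvSortedPairA_eq_if]; rfl

-- B's accumulation loops build the map of the concatenation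
theorem pvFoldlAppend {β : Type} (f : β → String × String) (l : List β) :
    ∀ (acc : List (String × String)),
      l.foldl (fun acc x => acc ++ [f x]) acc = acc ++ l.map f := by
  induction l with
  | nil => simp
  | cons x t ih => intro acc; simp [List.foldl, ih]

-- the strict lexicographic comparison sorted2 uses
def pvBefore (a b : String × String) : Bool :=
  decide (a.1 < b.1) || (!decide (b.1 < a.1) && decide (a.2 < b.2))

theorem pvBefore_asym {a b : String × String} (h : pvBefore a b = true) : pvBefore b a = false := by
  simp only [pvBefore, Bool.or_eq_true, Bool.and_eq_true, Bool.not_eq_true', decide_eq_true_iff,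
    decide_eq_false_iff_not, Bool.or_eq_false_iff, Bool.and_eq_false_iff, Bool.not_eq_false'] at *
  rcases h with h1 | ⟨h1, h2⟩
  · exact ⟨asymm h1, Or.inl (by simpa using h1)⟩
  · exact ⟨by simp [h1], Or.inr (asymm h2)⟩

theorem pvBefore_trans {a b c : String × String} (h1 : pvBefore a b = true) (h2 : pvBefore b c = true) :
    pvBefore a c = true := by
  simp only [pvBefore, Bool.or_eq_true, Bool.and_eq_true, Bool.not_eq_true', decide_eq_true_iff,
    decide_eq_false_iff_not] at *
  rcases h1 with h1 | ⟨h1a, h1b⟩ <;> rcases h2 with h2 | ⟨h2a, h2b⟩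
  · exact Or.inl (lt_trans h1 h2)
  · exact Or.inl (lt_of_lt_of_le h1 (not_lt.mp h2a))
  · exact Or.inl (lt_of_le_of_lt (not_lt.mp h1a) h2)
  · exact Or.inr ⟨not_lt.mpr (le_trans (not_lt.mp h1a) (not_lt.mp h2a)), lt_trans h1b h2b⟩

theorem pvBefore_antisym {a b : String × String} (h1 : pvBefore a b = false) (h2 : pvBefore b a = false) :
    a = b := by
  simp only [pvBefore, Bool.or_eq_false_iff, Bool.and_eq_false_iff, Bool.not_eq_false',
    decide_eq_false_iff_not, decide_eq_true_iff] at *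
  obtain ⟨hab1, hab2⟩ := h1
  obtain ⟨hba1, hba2⟩ := h2
  have hfst : a.1 = b.1 := le_antisymm (not_lt.mp hba1) (not_lt.mp hab1)
  have hsnd : a.2 = b.2 := by
    rcases hab2 with h | h
    · rw [hfst] at h; exact absurd h (lt_irrefl _)
    · rcases hba2 with h' | h'
      · rw [hfst] at h'; exact absurd h' (lt_irrefl _)
      · exact le_antisymm (not_lt.mp h') (not_lt.mp h)
  exact Prod.ext hfst hsnd

-- insertion keeps the list pairwise-ordered by ¬ pvBefore · ·
theorem pvInsertBy_pairwise (x : String × String) (ys : List (String × String))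
    (h : ys.Pairwise (fun a b => pvBefore b a = false)) :
    (PySem.List.insertBy pvBefore x ys).Pairwise (fun a b => pvBefore b a = false) := by
  induction ys with
  | nil => simp [PySem.List.insertBy]
  | cons y t ih =>
    rcases List.pairwise_cons.mp h with ⟨hy, ht⟩
    by_cases hb : pvBefore x y = true
    · simp only [PySem.List.insertBy, hb, if_pos]
      refine List.pairwise_cons.mpr ⟨?_, h⟩
      intro z hz
      rcases List.mem_cons.mp hz with rfl | hz
      · exact pvBefore_asym hb
      · have hyz := hy z hz
        by_cases hzx : pvBefore z x = true
        · have := pvBefore_trans hzx hb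
          rw [this] at hyz; cases hyz
        · simpa using hzx
    · have hb' : pvBefore x y = false := by simpa using hb
      simp only [PySem.List.insertBy, hb, if_neg, Bool.false_eq_true, not_false_iff]
      refine List.pairwise_cons.mpr ⟨?_, ih ht⟩
      intro z hz
      rcases (PySem.List.mem_insertBy pvBefore x z t).mp hz with rfl | hz
      · exact hb'
      · exact hy z hz

theorem pvFoldlInsert_pairwise (l : List (String × String)) :
    ∀ acc : List (String × String), acc.Pairwise (fun a b => pvBefore b a = false) →
      (l.foldl (fun acc x => PySem.List.insertBy pvBefore x acc) acc).Pairwise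
        (fun a b => pvBefore b a = false) := by
  induction l with
  | nil => intro acc h; simpa using h
  | cons x t ih => intro acc h; exact ih _ (pvInsertBy_pairwise x acc h)

theorem pvSorted2_pairwise (l : List (String × String)) :
    (PySem.List.sorted2 l (fun e => e.1) (fun e => e.2) false).Pairwise
      (fun a b => pvBefore b a = false) :=
  pvFoldlInsert_pairwise l [] (by simp)

-- card (insert e s) counted via the erase of e
theorem pvCardInsert (e : String × String) (s : Finset (String × String)) :
    (insert e s).card = (s.erase e).card + 1 := by
  by_cases h : e ∈ s
  · rw [Finset.insert_eq_self.mpr h, ← Finset.card_erase_add_one h]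
  · rw [Finset.erase_eq_self.mpr h, Finset.card_insert_of_notMem h]

-- the adjacent-compare pass counts the distinct elements of an ordered list
theorem pvCount_sorted_tail (s : List (String × String)) :
    ∀ (p : String × String) (c : Int),
      s.Pairwise (fun a b => pvBefore b a = false) → (∀ e ∈ s, pvBefore e p = false) →
      (s.foldl pvCountStep (c, some p)).1 = c + ((s.toFinset \ {p}).card : Int) := by
  induction s with
  | nil => intro p c _ _; simp
  | cons e t ih =>
    intro p c hpw hlb
    rcases List.pairwise_cons.mp hpw with ⟨he, ht⟩
    by_cases hep : e = p
    · subst hep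
      simp only [List.foldl, pvCountStep, ne_eq, not_true_eq_false, if_false]
      rw [ih e c ht (fun z hz => he z hz)]
      congr 2
      rw [List.toFinset_cons, Finset.insert_sdiff_of_mem _ (by simp)]
    · have hpt : p ∉ t := by
        intro hp
        exact hep (pvBefore_antisym (hlb e (by simp)) (he p hp))
      simp only [List.foldl, pvCountStep]
      rw [if_pos (by simpa using fun h => hep (Option.some.inj h))]
      rw [ih e (c + 1) ht (fun z hz => he z hz)]
      have hstep : ((e :: t).toFinset \ {p}).card = (t.toFinset \ {e}).card + 1 := by
        have h1 : (e :: t).toFinset \ {p} = insert e t.toFinset := by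
          rw [List.toFinset_cons, Finset.insert_sdiff_of_notMem _ (by simp [hep]),
            Finset.sdiff_singleton_eq_erase, Finset.erase_eq_self.mpr (by simpa using hpt)]
        rw [h1, pvCardInsert, Finset.sdiff_singleton_eq_erase]
      rw [hstep]
      push_cast
      ring

theorem pvCount_sorted (s : List (String × String))
    (hpw : s.Pairwise (fun a b => pvBefore b a = false)) :
    (s.foldl pvCountStep (0, none)).1 = (s.toFinset.card : Int) := by
  cases s with
  | nil => simp
  | cons e t =>
    rcases List.pairwise_cons.mp hpw with ⟨he, ht⟩
    simp only [List.foldl, pvCountStep, ne_eq, reduceCtorEq, not_false_iff, if_pos]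
    rw [pvCount_sorted_tail t e (0 + 1) ht (fun z hz => he z hz)]
    have : ((e :: t).toFinset.card : Int) = ((t.toFinset \ {e}).card : Int) + 1 := by
      rw [List.toFinset_cons, pvCardInsert, Finset.sdiff_singleton_eq_erase]
      push_cast; ring
    rw [this]
    ring

-- set length as a Finset cardinality
theorem pvOfList_toFinset_card (xs : List (String × String)) :
    (PySem.Set.ofList xs).length = xs.toFinset.card := by
  rw [← List.toFinset_card_of_nodup (PySem.Set.nodup_ofList xs)]
  congr 1
  ext y
  simp [PySem.Set.mem_ofList]

-- ===== VERDICT (by name: the statement is the Claim_ definition above) =====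
theorem contar_arestas_spec : Claim_equal_contar_arestas := by
  intro req nonreq _ _
  unfold Spec_contar_arestas contar_arestas contar_arestas_alt
  simp only [← pvNormB_eq]
  rw [pvFoldlAppend pvNormB req, pvFoldlAppend pvNormB nonreq, List.nil_append]
  have hA : (nonreq.foldl (fun s item => PySem.Set.add s (pvNormB item))
        (req.foldl (fun s item => PySem.Set.add s (pvNormB item)) PySem.Set.empty))
      = PySem.Set.ofList (req.map pvNormB ++ nonreq.map pvNormB) := by
    rw [PySem.Set.ofList_eq_foldl, List.foldl_append, List.foldl_map, List.foldl_map]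
    rfl
  rw [hA]
  have hperm := PySem.List.sorted2_perm (req.map pvNormB ++ nonreq.map pvNormB)
    (fun e => e.1) (fun e => e.2) false
  have hpw := pvSorted2_pairwise (req.map pvNormB ++ nonreq.map pvNormB)
  rw [pvCount_sorted _ hpw, List.toFinset_eq_of_perm _ _ hperm]
  simp [PySem.Set.len, pvOfList_toFinset_card]
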